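-- pv_equiv track=rewrite | github.com/CMMRLab/LUNAR | src/cell_builder/random_insertion.py | find_cumulative_neighs
-- ===== SOURCE A (Python) =====
-- def find_cumulative_neighs(graph, node, max_depth):
--     """
--     Finds the cummulative neighbors of a graph starting at
--     a given node and traversing to a maximum depth of max_depth.
--     Depth is defined as follows:
--
--     1. first neighbors
--     2. second neighbors
--     3. thrid neighbors
--     """
--     neighbors = {i+1 : set() for i in range(max_depth)} # { depth : {id1, id2, ...} }
--     neighbors[1] = set(graph[node])
--     visited = set(list(graph[node]) + [node])
--     for depth in range(1, max_depth):
--         for i in neighbors[depth]: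
--             for j in graph[i]:
--                 if j in visited: continue
--                 neighbors[depth+1].add(j)
--                 visited.add(j)
--     return neighbors
-- ===== SOURCE B (Python) =====
-- def find_cumulative_neighs(graph, node, max_depth):
--     """Same cumulative-neighbor dict as A, computed with a single
--     depth-tagged FIFO queue (node-at-a-time BFS) instead of A's
--     layer-by-layer sweeps over whole frontier sets."""
--     neighbors = {d + 1: set() for d in range(max_depth)}
--     first = set(graph[node])
--     neighbors[1] = first
--     visited = set(graph[node])
--     visited.add(node)
--     queue = [(v, 1) for v in first]
--     head = 0
--     while head < len(queue):
--         v, depth = queue[head]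
--         head += 1
--         if depth < max_depth:
--             for w in graph[v]:
--                 if w not in visited:
--                     visited.add(w)
--                     neighbors[depth + 1].add(w)
--                     queue.append((w, depth + 1))
--     return neighbors
-- ===== Notes on version B (the rewrite author's own statement) =====
-- stated objective: alternative
-- what changed: Replaced A's layer-by-layer traversal (outer loop over depths, re-reading whole frontier sets from the dict) with a single depth-tagged FIFO queue BFS that pops one node at a time and pushes its unvisited neighbors tagged depth+1.
import Mathlib
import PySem

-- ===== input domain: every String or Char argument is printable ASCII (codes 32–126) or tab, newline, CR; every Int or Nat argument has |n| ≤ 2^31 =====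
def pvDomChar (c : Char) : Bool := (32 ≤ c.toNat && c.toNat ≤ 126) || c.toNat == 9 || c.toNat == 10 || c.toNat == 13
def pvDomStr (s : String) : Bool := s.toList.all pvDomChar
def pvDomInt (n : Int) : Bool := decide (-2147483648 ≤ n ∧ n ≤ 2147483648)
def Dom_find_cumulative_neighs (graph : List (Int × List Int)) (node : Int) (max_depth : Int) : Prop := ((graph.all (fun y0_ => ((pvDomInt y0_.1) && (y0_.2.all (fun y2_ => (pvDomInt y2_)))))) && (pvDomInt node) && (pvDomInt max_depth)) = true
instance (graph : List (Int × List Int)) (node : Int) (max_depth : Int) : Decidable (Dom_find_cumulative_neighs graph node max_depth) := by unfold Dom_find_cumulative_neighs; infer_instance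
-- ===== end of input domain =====

-- B replaces A's layer-by-layer frontier sweeps with a single depth-tagged FIFO queue BFS
-- (alternative traversal, same result; claim is about the return value — neither mutates its arguments).

-- ===== PORT A =====
-- innermost loop: 'for j in graph[i]: if j in visited: continue; neighbors[depth+1].add(j); visited.add(j)'
def fcnA_inner (depth : Int) (s : PySem.Dict Int (PySem.Set Int) × PySem.Set Int) (j : Int) :
    PySem.Dict Int (PySem.Set Int) × PySem.Set Int :=
  if s.2.contains j then s
  else (s.1.modify (depth + 1) [] (fun t => t.add j), s.2.add j)

-- body of 'for i in neighbors[depth]'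
def fcnA_node (g : PySem.Dict Int (List Int)) (depth : Int)
    (s : PySem.Dict Int (PySem.Set Int) × PySem.Set Int) (i : Int) :
    PySem.Dict Int (PySem.Set Int) × PySem.Set Int :=
  (g.getD i []).foldl (fcnA_inner depth) s

-- body of 'for depth in range(1, max_depth)'
def fcnA_layer (g : PySem.Dict Int (List Int))
    (s : PySem.Dict Int (PySem.Set Int) × PySem.Set Int) (depth : Int) :
    PySem.Dict Int (PySem.Set Int) × PySem.Set Int :=
  (s.1.getD depth []).foldl (fcnA_node g depth) s

def find_cumulative_neighs (graph : List (Int × List Int)) (node : Int) (max_depth : Int) : List (Int × List Int) :=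
  let g : PySem.Dict Int (List Int) := PySem.Dict.mk graph
  let neighbors : PySem.Dict Int (PySem.Set Int) :=
    (PySem.List.pyRange 0 max_depth).foldl (fun d i => d.insert (i + 1) []) (PySem.Dict.mk [])
  let neighbors := neighbors.insert 1 (PySem.Set.ofList (g.getD node []))
  let visited : PySem.Set Int := PySem.Set.ofList (g.getD node [] ++ [node])
  ((PySem.List.pyRange 1 max_depth).foldl (fcnA_layer g) (neighbors, visited)).1.items

-- ===== PORT B =====
-- body of 'for w in graph[v]' in Source B; state = (visited, queue, neighbors)
def fcnB_inner (depth : Int)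
    (s : PySem.Set Int × List (Int × Int) × PySem.Dict Int (PySem.Set Int)) (w : Int) :
    PySem.Set Int × List (Int × Int) × PySem.Dict Int (PySem.Set Int) :=
  if s.1.contains w then s
  else (s.1.add w, s.2.1 ++ [(w, depth + 1)], s.2.2.modify (depth + 1) [] (fun t => t.add w))

-- every int ever pushed on the queue lies in this finite universe (termination measure only)
def bfs_univ (g : PySem.Dict Int (List Int)) : List Int :=
  PySem.List.dedup (g.items.map Prod.snd).flatten

lemma bfs_getD_sub_univ (g : PySem.Dict Int (List Int)) (v w : Int)
    (h : w ∈ g.getD v []) : w ∈ bfs_univ g := by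
  rw [bfs_univ, PySem.List.mem_dedup]
  simp only [PySem.Dict.getD, PySem.Dict.get?] at h
  cases hf : List.find? (fun p => p.1 == v) g.items with
  | none => rw [hf] at h; simp at h
  | some p =>
    rw [hf] at h; simp at h
    have hp : p ∈ g.items := List.mem_of_find?_eq_some hf
    exact List.mem_flatten.2 ⟨p.2, List.mem_map.2 ⟨p, hp, rfl⟩, h⟩

lemma bfs_filter_add (U : List Int) (hU : U.Nodup) (vis : PySem.Set Int) (w : Int)
    (hw : w ∈ U) (hv : ¬ vis.contains w = true) :
    (U.filter (fun x => ! (vis.add w).contains x)).length + 1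
      = (U.filter (fun x => ! vis.contains x)).length := by
  have hv' : w ∉ vis := by simpa [PySem.Set.contains] using hv
  have hadd : vis.add w = vis ++ [w] := by simp [PySem.Set.add, PySem.Set.contains, hv']
  have hcont : ∀ x, (vis.add w).contains x = (vis.contains x || x == w) := by
    intro x; simp [hadd, PySem.Set.contains, ← Bool.beq_eq_decide_eq]
  have h1 : U.filter (fun x => ! (vis.add w).contains x)
      = (U.filter (fun x => ! vis.contains x)).filter (fun x => !(x == w)) := by
    rw [List.filter_filter]
    apply List.filter_congr
    intro x _
    rw [hcont x]
    cases h : vis.contains x <;> simp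
  set l := U.filter (fun x => ! vis.contains x) with hl
  have hln : l.Nodup := hU.filter _
  have hwl : w ∈ l := by
    rw [hl]; exact List.mem_filter.2 ⟨hw, by simp [PySem.Set.contains, hv']⟩
  have h2 : l.filter (fun x => !(x == w)) = l.erase w := by
    rw [List.Nodup.erase_eq_filter hln w]
    apply List.filter_congr
    intro x hx; simp [bne]
  rw [h1, h2, List.length_erase_of_mem hwl]
  have : l.length ≠ 0 := by
    rintro h; rw [List.length_eq_zero_iff] at h; simp [h] at hwl
  omega

-- the termination lemma bfs_go cites in decreasing_by
lemma bfs_fold_measure (depth : Int) (adj U : List Int) (hU : U.Nodup)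
    (hadj : ∀ w ∈ adj, w ∈ U) :
    ∀ (vis : PySem.Set Int) (q : List (Int × Int)) (nb : PySem.Dict Int (PySem.Set Int)),
    (adj.foldl (fcnB_inner depth) (vis, q, nb)).2.1.length
      + (U.filter (fun x => ! (adj.foldl (fcnB_inner depth) (vis, q, nb)).1.contains x)).length
      ≤ q.length + (U.filter (fun x => ! vis.contains x)).length := by
  induction adj with
  | nil => simp
  | cons w adj ih =>
    intro vis q nb
    have hadj' : ∀ x ∈ adj, x ∈ U := fun x hx => hadj x (List.mem_cons_of_mem _ hx)
    simp only [List.foldl_cons]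
    by_cases h : vis.contains w = true
    · rw [show fcnB_inner depth (vis, q, nb) w = (vis, q, nb) by simp only [fcnB_inner]; rw [if_pos h]]
      exact ih hadj' vis q nb
    · rw [show fcnB_inner depth (vis, q, nb) w
          = (vis.add w, q ++ [(w, depth + 1)], nb.modify (depth + 1) [] (fun t => t.add w)) by
        simp only [fcnB_inner]; rw [if_neg h]]
      have hkey := bfs_filter_add U hU vis w (hadj w (List.mem_cons_self)) h
      have := ih hadj' (vis.add w) (q ++ [(w, depth + 1)]) (nb.modify (depth + 1) [] (fun t => t.add w))
      simp only [List.length_append, List.length_cons, List.length_nil] at this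
      omega

-- the 'while head < len(queue)' loop of Source B, queue as a FIFO list
def bfs_go (g : PySem.Dict Int (List Int)) (max_depth : Int)
    (queue : List (Int × Int)) (visited : PySem.Set Int)
    (neighbors : PySem.Dict Int (PySem.Set Int)) : PySem.Dict Int (PySem.Set Int) :=
  match queue with
  | [] => neighbors
  | (v, depth) :: rest =>
    if depth < max_depth then
      let s := (g.getD v []).foldl (fcnB_inner depth) (visited, rest, neighbors)
      bfs_go g max_depth s.2.1 s.1 s.2.2
    else bfs_go g max_depth rest visited neighbors
termination_by queue.length + ((bfs_univ g).filter (fun x => ! visited.contains x)).length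
decreasing_by
  · have h := bfs_fold_measure depth (g.getD v []) (bfs_univ g)
      (by simp [bfs_univ])
      (fun w hw => bfs_getD_sub_univ g v w hw) visited rest neighbors
    simp only [List.length_cons]
    omega
  · simp only [List.length_cons]
    omega

def find_cumulative_neighs_alt (graph : List (Int × List Int)) (node : Int) (max_depth : Int) : List (Int × List Int) :=
  let g : PySem.Dict Int (List Int) := PySem.Dict.mk graph
  let neighbors : PySem.Dict Int (PySem.Set Int) :=
    (PySem.List.pyRange 0 max_depth).foldl (fun d i => d.insert (i + 1) []) (PySem.Dict.mk [])
  let first : PySem.Set Int := PySem.Set.ofList (g.getD node [])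
  let neighbors := neighbors.insert 1 first
  let visited : PySem.Set Int := (PySem.Set.ofList (g.getD node [])).add node
  (bfs_go g max_depth (first.map (fun v => (v, 1))) visited neighbors).items

-- ===== PRECONDITION & SPEC =====
-- Pre_ excludes the KeyError inputs: A indexes graph[node] (always), graph[node]'s neighbors (when
-- max_depth ≥ 2) and every traversed id (when max_depth ≥ 3); the last case is over-approximated by
-- requiring all adjacency entries to be keys, which also excludes some inputs whose dangling ids A
-- never reaches and thus returns on (see cites).
def Pre_find_cumulative_neighs (graph : List (Int × List Int)) (node : Int) (max_depth : Int) : Prop :=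
  node ∈ graph.map Prod.fst
  ∧ (2 ≤ max_depth → ∀ p ∈ graph, p.1 = node → ∀ v ∈ p.2, v ∈ graph.map Prod.fst)
  ∧ (3 ≤ max_depth → ∀ p ∈ graph, ∀ v ∈ p.2, v ∈ graph.map Prod.fst)
instance (graph : List (Int × List Int)) (node : Int) (max_depth : Int) : Decidable (Pre_find_cumulative_neighs graph node max_depth) := by unfold Pre_find_cumulative_neighs; infer_instance

def pvWitness_find_cumulative_neighs : (List (Int × List Int)) × Int × Int :=
  ([(0, [1, 2]), (1, [0, 2]), (2, [0])], 0, 2)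

def Spec_find_cumulative_neighs (graph : List (Int × List Int)) (node : Int) (max_depth : Int) (out : List (Int × List Int)) : Prop := out = find_cumulative_neighs_alt graph node max_depth
instance (graph : List (Int × List Int)) (node : Int) (max_depth : Int) (out : List (Int × List Int)) : Decidable (Spec_find_cumulative_neighs graph node max_depth out) := by unfold Spec_find_cumulative_neighs; infer_instance

-- ===== CLAIM (what is proved, stated in full; the proofs are below) =====
def Claim_equal_find_cumulative_neighs : Prop := ∀ (graph : List (Int × List Int)) (node : Int) (max_depth : Int), Dom_find_cumulative_neighs graph node max_depth → Pre_find_cumulative_neighs graph node max_depth → Spec_find_cumulative_neighs graph node max_depth (find_cumulative_neighs graph node max_depth)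

-- ===== LEMMAS AND PROOFS =====

-- unfoldings of bfs_go
lemma bfs_go_nil (g : PySem.Dict Int (List Int)) (md : Int) (vis : PySem.Set Int)
    (nb : PySem.Dict Int (PySem.Set Int)) : bfs_go g md [] vis nb = nb := by
  rw [bfs_go]

lemma bfs_go_cons_lt (g : PySem.Dict Int (List Int)) (md v depth : Int)
    (rest : List (Int × Int)) (vis : PySem.Set Int) (nb : PySem.Dict Int (PySem.Set Int))
    (h : depth < md) :
    bfs_go g md ((v, depth) :: rest) vis nb
      = bfs_go g md ((g.getD v []).foldl (fcnB_inner depth) (vis, rest, nb)).2.1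
          ((g.getD v []).foldl (fcnB_inner depth) (vis, rest, nb)).1
          ((g.getD v []).foldl (fcnB_inner depth) (vis, rest, nb)).2.2 := by
  rw [bfs_go]
  simp only [if_pos h]

lemma bfs_go_cons_ge (g : PySem.Dict Int (List Int)) (md v depth : Int)
    (rest : List (Int × Int)) (vis : PySem.Set Int) (nb : PySem.Dict Int (PySem.Set Int))
    (h : ¬ depth < md) :
    bfs_go g md ((v, depth) :: rest) vis nb = bfs_go g md rest vis nb := by
  rw [bfs_go]
  simp only [if_neg h]

-- one pass of B's inner loop equals one pass of A's inner loop, queueing exactly the ids it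
-- appends to neighbors[depth+1]
lemma inner_sim (d : Int) (adj : List Int) :
    ∀ (vis : PySem.Set Int) (nb : PySem.Dict Int (PySem.Set Int)) (q : List (Int × Int)),
    (∀ x ∈ nb.getD (d + 1) [], x ∈ vis) →
    ∃ delta : List Int,
      adj.foldl (fcnB_inner d) (vis, q, nb)
        = ((adj.foldl (fcnA_inner d) (nb, vis)).2,
           q ++ delta.map (fun w => (w, d + 1)),
           (adj.foldl (fcnA_inner d) (nb, vis)).1)
      ∧ (adj.foldl (fcnA_inner d) (nb, vis)).1.getD (d + 1) [] = nb.getD (d + 1) [] ++ delta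
      ∧ (∀ e, e ≠ d + 1 → (adj.foldl (fcnA_inner d) (nb, vis)).1.getD e [] = nb.getD e [])
      ∧ (∀ x ∈ (adj.foldl (fcnA_inner d) (nb, vis)).1.getD (d + 1) [],
           x ∈ (adj.foldl (fcnA_inner d) (nb, vis)).2) := by
  induction adj with
  | nil =>
    intro vis nb q hsub
    exact ⟨[], by simp, by simp, fun e _ => rfl, hsub⟩
  | cons j adj ih =>
    intro vis nb q hsub
    simp only [List.foldl_cons]
    by_cases h : vis.contains j = true
    · rw [show fcnB_inner d (vis, q, nb) j = (vis, q, nb) by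
        simp only [fcnB_inner]; rw [if_pos h]]
      rw [show fcnA_inner d (nb, vis) j = (nb, vis) by
        simp only [fcnA_inner]; rw [if_pos h]]
      exact ih vis nb q hsub
    · rw [show fcnB_inner d (vis, q, nb) j
          = (vis.add j, q ++ [(j, d + 1)], nb.modify (d + 1) [] (fun t => t.add j)) by
        simp only [fcnB_inner]; rw [if_neg h]]
      rw [show fcnA_inner d (nb, vis) j
          = (nb.modify (d + 1) [] (fun t => t.add j), vis.add j) by
        simp only [fcnA_inner]; rw [if_neg h]]
      have hj : j ∉ vis := by simpa [PySem.Set.contains] using h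
      have hjacc : j ∉ nb.getD (d + 1) [] := fun hx => hj (hsub j hx)
      have hgetD : (nb.modify (d + 1) [] (fun t => t.add j)).getD (d + 1) []
          = nb.getD (d + 1) [] ++ [j] := by
        rw [PySem.Dict.getD_modify_self]
        simp [PySem.Set.add, PySem.Set.contains, hjacc]
      have hsub' : ∀ x ∈ (nb.modify (d + 1) [] (fun t => t.add j)).getD (d + 1) [],
          x ∈ vis.add j := by
        rw [hgetD]
        intro x hx
        rcases List.mem_append.1 hx with hx | hx
        · exact (PySem.Set.mem_add vis j x).2 (Or.inl (hsub x hx))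
        · exact (PySem.Set.mem_add vis j x).2 (Or.inr (by simpa using hx))
      obtain ⟨delta, he, hacc, hoth, hfin⟩ :=
        ih (vis.add j) (nb.modify (d + 1) [] (fun t => t.add j)) (q ++ [(j, d + 1)]) hsub'
      refine ⟨j :: delta, ?_, ?_, ?_, hfin⟩
      · rw [he]; simp
      · rw [hacc, hgetD]; simp
      · intro e he'
        rw [hoth e he', PySem.Dict.getD_modify, if_neg he']

-- processing B's queue through a whole layer equals A's fold over that layer
lemma layer_sim (g : PySem.Dict Int (List Int)) (md d : Int) (hd : d < md) (L : List Int) :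
    ∀ (vis : PySem.Set Int) (nb : PySem.Dict Int (PySem.Set Int)),
    (∀ x ∈ nb.getD (d + 1) [], x ∈ vis) →
    bfs_go g md (L.map (fun v => (v, d)) ++ (nb.getD (d + 1) []).map (fun w => (w, d + 1))) vis nb
      = bfs_go g md
          (((L.foldl (fcnA_node g d) (nb, vis)).1.getD (d + 1) []).map (fun w => (w, d + 1)))
          (L.foldl (fcnA_node g d) (nb, vis)).2
          (L.foldl (fcnA_node g d) (nb, vis)).1
      ∧ (∀ x ∈ (L.foldl (fcnA_node g d) (nb, vis)).1.getD (d + 1) [],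
           x ∈ (L.foldl (fcnA_node g d) (nb, vis)).2)
      ∧ (∀ e, e ≠ d + 1 → (L.foldl (fcnA_node g d) (nb, vis)).1.getD e [] = nb.getD e []) := by
  induction L with
  | nil =>
    intro vis nb hsub
    exact ⟨by simp, hsub, fun e _ => rfl⟩
  | cons i L ih =>
    intro vis nb hsub
    simp only [List.map_cons, List.cons_append, List.foldl_cons]
    rw [bfs_go_cons_lt g md i d _ vis nb hd]
    obtain ⟨delta, he, hacc, hoth, hfin⟩ :=
      inner_sim d (g.getD i []) vis nb
        (L.map (fun v => (v, d)) ++ (nb.getD (d + 1) []).map (fun w => (w, d + 1))) hsub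
    rw [he]
    have hq : (L.map (fun v => (v, d)) ++ (nb.getD (d + 1) []).map (fun w => (w, d + 1)))
        ++ delta.map (fun w => (w, d + 1))
        = L.map (fun v => (v, d))
          ++ (((g.getD i []).foldl (fcnA_inner d) (nb, vis)).1.getD (d + 1) []).map
              (fun w => (w, d + 1)) := by
      rw [hacc]
      simp
    rw [hq]
    have hA : fcnA_node g d (nb, vis) i = (g.getD i []).foldl (fcnA_inner d) (nb, vis) := rfl
    rw [hA]
    obtain ⟨ihe, ihsub, ihoth⟩ := ih _ _ hfin
    refine ⟨ihe, ihsub, ?_⟩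
    intro e he'
    rw [ihoth e he', hoth e he']

-- a queue whose items are all at depth ≥ max_depth is just drained
lemma drain (g : PySem.Dict Int (List Int)) (md d : Int) (hd : ¬ d < md) (L : List Int) :
    ∀ (vis : PySem.Set Int) (nb : PySem.Dict Int (PySem.Set Int)),
    bfs_go g md (L.map (fun v => (v, d))) vis nb = nb := by
  induction L with
  | nil => intro vis nb; exact bfs_go_nil g md vis nb
  | cons i L ih =>
    intro vis nb
    simp only [List.map_cons]
    rw [bfs_go_cons_ge g md i d _ vis nb hd]
    exact ih vis nb

-- the full outer loop
lemma outer_sim (g : PySem.Dict Int (List Int)) (md : Int) :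
    ∀ (n : Nat) (d : Int) (vis : PySem.Set Int) (nb : PySem.Dict Int (PySem.Set Int)),
    (md - d).toNat = n →
    (∀ e, d < e → nb.getD e [] = []) →
    bfs_go g md ((nb.getD d []).map (fun v => (v, d))) vis nb
      = ((PySem.List.pyRange d md).foldl (fcnA_layer g) (nb, vis)).1 := by
  intro n
  induction n with
  | zero =>
    intro d vis nb hn hempty
    have hlt : ¬ d < md := by omega
    have hr : PySem.List.pyRange d md = [] := by
      simp only [PySem.List.pyRange]
      simp
      intro h2
      omega
    rw [hr, List.foldl_nil]
    exact drain g md d hlt _ vis nb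
  | succ n ih =>
    intro d vis nb hn hempty
    by_cases hlt : d < md
    · rw [PySem.List.pyRange_one_cons hlt, List.foldl_cons]
      have hsub : ∀ x ∈ nb.getD (d + 1) [], x ∈ vis := by
        rw [hempty (d + 1) (by omega)]
        intro x hx
        simp at hx
      obtain ⟨he, hfin, hoth⟩ := layer_sim g md d hlt (nb.getD d []) vis nb hsub
      have hq : (nb.getD d []).map (fun v => (v, d))
          = (nb.getD d []).map (fun v => (v, d))
            ++ (nb.getD (d + 1) []).map (fun w => (w, d + 1)) := by
        rw [hempty (d + 1) (by omega)]
        simp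
      rw [hq, he]
      have hA : fcnA_layer g (nb, vis) d
          = (nb.getD d []).foldl (fcnA_node g d) (nb, vis) := rfl
      rw [hA]
      set a := (nb.getD d []).foldl (fcnA_node g d) (nb, vis) with ha
      have hempty' : ∀ e, d + 1 < e → a.1.getD e [] = [] := by
        intro e he'
        rw [hoth e (by omega), hempty e (by omega)]
      have := ih (d + 1) a.2 a.1 (by omega) hempty'
      rw [this]
    · have hr : PySem.List.pyRange d md = [] := by
        simp only [PySem.List.pyRange]
        simp
        intro h2
        omega
      rw [hr, List.foldl_nil]
      exact drain g md d hlt _ vis nb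

lemma prefill_getD (l : List Int) (e : Int) :
    ∀ (D : PySem.Dict Int (PySem.Set Int)), D.getD e [] = [] →
    (l.foldl (fun d i => d.insert (i + 1) ([] : PySem.Set Int)) D).getD e [] = [] := by
  induction l with
  | nil => intro D hD; exact hD
  | cons i l ih =>
    intro D hD
    rw [List.foldl_cons]
    apply ih
    by_cases h : e = i + 1
    · rw [h, PySem.Dict.getD_insert_self]
    · rw [PySem.Dict.getD_insert_of_ne _ _ _ h, hD]

lemma main_eq (g : PySem.Dict Int (List Int)) (node md : Int) :
    ((PySem.List.pyRange 1 md).foldl (fcnA_layer g)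
       (((PySem.List.pyRange 0 md).foldl (fun d i => d.insert (i + 1) ([] : PySem.Set Int))
           (PySem.Dict.mk [])).insert 1 (PySem.Set.ofList (g.getD node [])),
        PySem.Set.ofList (g.getD node [] ++ [node]))).1.items
      = (bfs_go g md ((PySem.Set.ofList (g.getD node [])).map (fun v => (v, 1)))
           ((PySem.Set.ofList (g.getD node [])).add node)
           (((PySem.List.pyRange 0 md).foldl (fun d i => d.insert (i + 1) ([] : PySem.Set Int))
               (PySem.Dict.mk [])).insert 1 (PySem.Set.ofList (g.getD node [])))).items := by
  set pre := (PySem.List.pyRange 0 md).foldl (fun d i => d.insert (i + 1) ([] : PySem.Set Int))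
    (PySem.Dict.mk []) with hpre
  set first := PySem.Set.ofList (g.getD node []) with hfirst
  set nb1 := pre.insert 1 first with hnb1
  have hvis : PySem.Set.ofList (g.getD node [] ++ [node]) = first.add node := by
    rw [hfirst, PySem.Set.ofList_eq_foldl, PySem.Set.ofList_eq_foldl, List.foldl_append]
    rfl
  rw [hvis]
  have h1 : nb1.getD 1 [] = first := PySem.Dict.getD_insert_self pre 1 first []
  have hempty : ∀ e, (1 : Int) < e → nb1.getD e [] = [] := by
    intro e he
    rw [hnb1, PySem.Dict.getD_insert_of_ne _ _ _ (by omega), hpre]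
    exact prefill_getD _ e _ rfl
  have h := outer_sim g md (md - 1).toNat 1 (first.add node) nb1 rfl hempty
  rw [h1] at h
  rw [h]

-- ===== VERDICT (by name: the statement is the Claim_ definition above) =====
theorem find_cumulative_neighs_spec : Claim_equal_find_cumulative_neighs := by
  intro graph node md _ _
  show find_cumulative_neighs graph node md = find_cumulative_neighs_alt graph node md
  unfold find_cumulative_neighs find_cumulative_neighs_alt
  exact main_eq (PySem.Dict.mk graph) node md
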